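-- pv_equiv track=rewrite | github.com/KakaoFarm/unan-python-algorithm-study | Implementation/시각.py | solution
-- ===== SOURCE A (Python) =====
-- def solution(N):
--     ans = 0
--     for i in range(int(N)+1):
--         if '3' in str(i):
--             ans += 60 * 60
--
--         else:
--             ans += 15*45 + 60*15
--     return ans
-- ===== SOURCE B (Python) =====
-- def _has_no3(q):
--     # True iff the decimal representation of q contains no digit 3
--     while q > 0:
--         if q % 10 == 3:
--             return False
--         q //= 10
--     return True
--
--
-- def _count_no3(m):
--     # number of integers in [0, m) whose decimal representation has no digit 3
--     if m == 0:
--         return 0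
--     q, r = divmod(m, 10)
--     extra = (r if r <= 3 else r - 1) if _has_no3(q) else 0
--     return 9 * _count_no3(q) + extra
--
--
-- def solution(N):
--     n = int(N) + 1            # hours 0..N
--     if n <= 0:
--         return 0
--     h3 = n - _count_no3(n)    # hours whose decimal string contains '3'
--     return 1575 * n + 2025 * h3
-- ===== Notes on version B (the rewrite author's own statement) =====
-- stated objective: faster
-- what changed: Replaced the per-hour loop testing whether each hour's decimal string contains a three by a logarithmic-time digit-DP counting the hours without that digit, combined into a single closed-form expression.
import Mathlib
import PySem

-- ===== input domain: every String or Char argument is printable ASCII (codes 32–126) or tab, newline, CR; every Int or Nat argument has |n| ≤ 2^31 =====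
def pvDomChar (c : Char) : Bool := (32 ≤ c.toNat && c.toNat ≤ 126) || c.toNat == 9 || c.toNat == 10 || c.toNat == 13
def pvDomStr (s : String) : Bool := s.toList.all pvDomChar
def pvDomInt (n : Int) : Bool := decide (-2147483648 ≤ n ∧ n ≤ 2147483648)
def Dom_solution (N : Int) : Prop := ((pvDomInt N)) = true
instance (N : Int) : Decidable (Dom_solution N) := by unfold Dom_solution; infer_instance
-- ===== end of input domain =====

-- B replaces A's per-hour loop by a digit-DP count of the hours without the flagged digit plus a closed form
-- (objective: faster — O(log N) arithmetic instead of O(N) string scans).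

-- ===== PORT A =====
def solution (N : Int) : Int :=
  (PySem.List.pyRange 0 (N + 1) 1).foldl
    (fun ans i =>
      if PySem.Str.isIn "3" (PySem.Int.toStr i) then ans + 60 * 60
      else ans + (15 * 45 + 60 * 15)) 0

-- ===== PORT B =====
-- _has_no3: the while-loop over q's decimal digits, as structural recursion on q/10
def pvHasNo3 (q : Nat) : Bool :=
  if q = 0 then true
  else if q % 10 = 3 then false
  else pvHasNo3 (q / 10)
decreasing_by exact Nat.div_lt_self (Nat.pos_of_ne_zero (by assumption)) (by norm_num)

def pvCountNo3 (m : Nat) : Nat :=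
  if m = 0 then 0
  else
    let q := m / 10
    let r := m % 10
    let extra := if pvHasNo3 q then (if r ≤ 3 then r else r - 1) else 0
    9 * pvCountNo3 q + extra
decreasing_by exact Nat.div_lt_self (Nat.pos_of_ne_zero (by assumption)) (by norm_num)

def solution_alt (N : Int) : Int :=
  let n := N + 1
  if n ≤ 0 then 0
  else
    let h3 : Int := n - (pvCountNo3 n.toNat : Int)
    1575 * n + 2025 * h3

-- ===== PRECONDITION & SPEC =====
def Spec_solution (N : Int) (out : Int) : Prop := out = solution_alt N
instance (N : Int) (out : Int) : Decidable (Spec_solution N out) := by unfold Spec_solution; infer_instance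

-- ===== CLAIM (what is proved, stated in full; the proofs are below) =====
def Claim_equal_solution : Prop := ∀ (N : Int), Dom_solution N → Spec_solution N (solution N)

-- ===== LEMMAS AND PROOFS =====

theorem toDigitsCore_eq_digits (fuel : ℕ) : ∀ (n : ℕ) (acc : List Char), 0 < n → n ≤ fuel →
    Nat.toDigitsCore 10 fuel n acc = ((Nat.digits 10 n).map Nat.digitChar).reverse ++ acc := by
  induction fuel with
  | zero => intro n acc h0 hf; omega
  | succ f ih =>
    intro n acc h0 hf
    rw [Nat.toDigitsCore]
    by_cases hq : n / 10 = 0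
    · simp only [hq, if_true]
      rw [Nat.digits_def' (by norm_num) h0]
      have h2 : Nat.digits 10 (n / 10) = [] := by rw [hq]; simp
      simp [h2]
    · have h1 : 0 < n / 10 := Nat.pos_of_ne_zero hq
      have hlt : n / 10 < n := Nat.div_lt_self h0 (by norm_num)
      simp only [hq, if_false]
      rw [ih _ _ h1 (by omega), Nat.digits_def' (by norm_num) h0]
      simp

theorem mem_toDigits_iff (m : ℕ) : '3' ∈ Nat.toDigits 10 m ↔ 3 ∈ Nat.digits 10 m := by
  by_cases hm : m = 0
  · subst hm
    rw [Nat.toDigits]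
    simp [Nat.toDigitsCore, Nat.digitChar]
  · rw [Nat.toDigits, toDigitsCore_eq_digits (m + 1) m [] (Nat.pos_of_ne_zero hm) (by omega)]
    simp only [List.append_nil, List.mem_reverse, List.mem_map]
    constructor
    · rintro ⟨d, hd, hc⟩
      have : d < 10 := Nat.digits_lt_base (by norm_num) hd
      interval_cases d <;> simp_all [Nat.digitChar]
    · intro h; exact ⟨3, h, rfl⟩

theorem isIn3_eq (m : ℕ) :
    PySem.Str.isIn "3" (PySem.Int.toStr (m : Int)) = decide (3 ∈ Nat.digits 10 m) := by
  have h1 : PySem.Int.toChars (m : Int) = Nat.toDigits 10 m := by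
    simp [PySem.Int.toChars]
  rw [Bool.eq_iff_iff, decide_eq_true_iff]
  rw [show PySem.Str.isIn "3" (PySem.Int.toStr (m : Int))
      = PySem.Chars.isIn "3".toList (PySem.Int.toStr (m : Int)).toList from by simp,
    PySem.Int.toList_toStr, h1, PySem.Chars.isIn_iff_infix]
  rw [← mem_toDigits_iff]
  constructor
  · intro h; exact h.subset (by simp [show "3".toList = ['3'] from rfl])
  · intro h
    obtain ⟨s, t, heq⟩ := List.append_of_mem h
    rw [heq]
    exact ⟨s, t, by simp [show "3".toList = ['3'] from rfl]⟩

theorem pvHasNo3_iff (q : ℕ) : pvHasNo3 q = true ↔ 3 ∉ Nat.digits 10 q := by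
  induction q using Nat.strong_induction_on with
  | _ q ih =>
    rw [pvHasNo3]
    by_cases h0 : q = 0
    · simp [h0]
    · have hd := Nat.digits_def' (b := 10) (by norm_num) (Nat.pos_of_ne_zero h0)
      by_cases h3 : q % 10 = 3
      · simp [h0, h3, hd]
      · rw [if_neg h0, if_neg h3, ih (q / 10) (Nat.div_lt_self (Nat.pos_of_ne_zero h0) (by norm_num)), hd]
        simp [Ne.symm h3]

theorem pvCountNo3_eq (m : ℕ) (h : ¬ m = 0) :
    pvCountNo3 m = 9 * pvCountNo3 (m / 10) +
      (if pvHasNo3 (m / 10) then (if m % 10 ≤ 3 then m % 10 else m % 10 - 1) else 0) := by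
  rw [pvCountNo3]; simp [h]

theorem pvCountNo3_succ (m : ℕ) :
    pvCountNo3 (m + 1) = pvCountNo3 m + (if 3 ∈ Nat.digits 10 m then 0 else 1) := by
  induction m using Nat.strong_induction_on with
  | _ m ih =>
    by_cases h0 : m = 0
    · subst h0
      have a0 : pvCountNo3 0 = 0 := by rw [pvCountNo3]; simp
      have a1 : pvCountNo3 1 = 1 := by rw [pvCountNo3]; simp [pvHasNo3, a0]
      simp [a0, a1]
    · have hd := Nat.digits_def' (b := 10) (by norm_num) (Nat.pos_of_ne_zero h0)
      have hdiv : m / 10 < m := Nat.div_lt_self (Nat.pos_of_ne_zero h0) (by norm_num)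
      rw [pvCountNo3_eq (m + 1) (by omega), pvCountNo3_eq m h0]
      by_cases hr : m % 10 = 9
      · -- carry: (m+1)/10 = m/10 + 1, (m+1)%10 = 0
        have e1 : (m + 1) / 10 = m / 10 + 1 := by omega
        have e2 : (m + 1) % 10 = 0 := by omega
        rw [e1, e2, ih (m / 10) hdiv]
        simp only [hd, hr, List.mem_cons]
        by_cases hq : pvHasNo3 (m / 10)
        · have hq3 : 3 ∉ Nat.digits 10 (m / 10) := (pvHasNo3_iff _).mp hq
          simp [hq, hq3]
          omega
        · have hq3 : 3 ∈ Nat.digits 10 (m / 10) := by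
            by_contra hc; exact hq ((pvHasNo3_iff _).mpr hc)
          simp [hq, hq3]
      · have e1 : (m + 1) / 10 = m / 10 := by omega
        have e2 : (m + 1) % 10 = m % 10 + 1 := by omega
        rw [e1, e2]
        simp only [hd, List.mem_cons]
        by_cases hq : pvHasNo3 (m / 10)
        · have hq3 : 3 ∉ Nat.digits 10 (m / 10) := (pvHasNo3_iff _).mp hq
          simp only [hq, hq3, if_true, or_false]
          split_ifs <;> omega
        · have hq3 : 3 ∈ Nat.digits 10 (m / 10) := by
            by_contra hc; exact hq ((pvHasNo3_iff _).mpr hc)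
          simp [hq, hq3]

theorem foldA (M : ℕ) :
    (PySem.List.pyRange 0 (M : Int) 1).foldl
      (fun ans i =>
        if PySem.Str.isIn "3" (PySem.Int.toStr i) then ans + 60 * 60
        else ans + (15 * 45 + 60 * 15)) 0
    = 1575 * (M : Int) + 2025 * ((M : Int) - (pvCountNo3 M : Int)) := by
  induction M with
  | zero =>
    rw [PySem.List.pyRange_one_eq_nil (by norm_num)]
    rw [pvCountNo3]
    simp
  | succ k ih =>
    have hc : ((k + 1 : ℕ) : Int) = (k : Int) + 1 := by push_cast; ring
    rw [hc, PySem.List.pyRange_one_succ_right (by positivity), List.foldl_append]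
    simp only [List.foldl_cons, List.foldl_nil, ih, isIn3_eq k, pvCountNo3_succ k]
    by_cases h3 : 3 ∈ Nat.digits 10 k <;> simp [h3] <;> ring

-- ===== VERDICT (by name: the statement is the Claim_ definition above) =====
theorem solution_spec : Claim_equal_solution := by
  intro N _
  unfold Spec_solution solution solution_alt
  by_cases h : N + 1 ≤ 0
  · rw [PySem.List.pyRange_one_eq_nil (by omega)]
    simp [h]
  · have h0 : (0 : Int) ≤ N + 1 := by omega
    have hM : ((N + 1).toNat : Int) = N + 1 := Int.toNat_of_nonneg h0
    rw [← hM, foldA]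
    simp [h, hM]
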